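-- pv_equiv track=rewrite | github.com/rmtew/amiga-reversing | scripts/m68k_executor.py | _parse_operand_text
-- ===== SOURCE A (Python) =====
-- def _parse_operand_text(text: str) -> tuple[str | None, str | None]:
--     """Extract source and destination operand strings from instruction text.
--
--     Returns (src_text, dst_text). Either may be None.
--     Handles: 'move.l d0,d1' -> ('d0', 'd1')
--              'clr.l d0' -> (None, 'd0')
--              'rts' -> (None, None)
--     """
--     parts = text.strip().split(None, 1)
--     if len(parts) < 2:
--         return None, None
--     operand_str = parts[1].strip()
--     # Split on comma, but not inside parentheses
--     depth = 0
--     split_pos = -1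
--     for i, ch in enumerate(operand_str):
--         if ch == '(':
--             depth += 1
--         elif ch == ')':
--             depth -= 1
--         elif ch == ',' and depth == 0:
--             split_pos = i
--             break
--     if split_pos >= 0:
--         return operand_str[:split_pos].strip(), operand_str[split_pos + 1:].strip()
--     return operand_str, None
-- ===== SOURCE B (Python) =====
-- def _parse_operand_text(text: str) -> tuple:
--     """Piece-based re-implementation: split the operand string on commas and
--     walk the pieces with a running paren depth; the first piece boundary at
--     depth zero separates src from dst."""
--     parts = text.strip().split(None, 1)
--     if len(parts) < 2:
--         return None, None
--     operand_str = parts[1].strip()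
--     pieces = operand_str.split(',')
--     depth = 0
--     for k in range(len(pieces) - 1):
--         depth += pieces[k].count('(') - pieces[k].count(')')
--         if depth == 0:
--             return ','.join(pieces[:k + 1]).strip(), ','.join(pieces[k + 1:]).strip()
--     return operand_str, None
-- ===== Notes on version B (the rewrite author's own statement) =====
-- stated objective: alternative
-- what changed: B splits the operand string on commas once and walks whole pieces accumulating a parenthesis net-depth, rejoining the pieces with the comma separator at the first zero-depth boundary, instead of A's per-character indexed scan with substring slicing.
import Mathlib
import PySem

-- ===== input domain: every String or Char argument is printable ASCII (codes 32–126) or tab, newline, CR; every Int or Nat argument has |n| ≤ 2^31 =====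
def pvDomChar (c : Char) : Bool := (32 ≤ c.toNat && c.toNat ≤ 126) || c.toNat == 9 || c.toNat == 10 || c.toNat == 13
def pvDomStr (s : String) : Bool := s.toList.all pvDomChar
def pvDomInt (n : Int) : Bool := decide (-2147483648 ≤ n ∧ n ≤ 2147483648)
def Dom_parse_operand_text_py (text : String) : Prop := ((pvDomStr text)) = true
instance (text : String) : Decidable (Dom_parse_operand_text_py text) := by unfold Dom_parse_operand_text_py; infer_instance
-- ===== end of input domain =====

-- B splits the operand string on commas and walks whole pieces with a running
-- parenthesis net-depth instead of A's per-character indexed scan (alternative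
-- decomposition; same asymptotic cost).

-- ===== PORT A =====
-- A's character loop: depth starts at 0, returns the first index i with
-- operand_str[i] is a comma at depth 0, else -1 (split_pos).
def pvScanA : List Char → Int → Int → Int
  | [], _, _ => -1
  | c :: cs, depth, i =>
    if c = '(' then pvScanA cs (depth + 1) (i + 1)
    else if c = ')' then pvScanA cs (depth - 1) (i + 1)
    else if c = ',' ∧ depth = 0 then i
    else pvScanA cs depth (i + 1)

def parse_operand_text_py (text : String) : Option String × Option String :=
  let parts := PySem.Str.split₀Max (PySem.Str.strip text) 1
  if parts.length < 2 then (none, none)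
  else
    let operand_str := PySem.Chars.strip ((PySem.List.pyGet? parts 1).getD "").toList
    let split_pos := pvScanA operand_str 0 0
    if split_pos ≥ 0 then
      (some (String.ofList (PySem.Chars.strip (PySem.List.slice operand_str none (some split_pos)))),
       some (String.ofList (PySem.Chars.strip (PySem.List.slice operand_str (some (split_pos + 1)) none))))
    else (some (String.ofList operand_str), none)

-- ===== PORT B =====
-- B's piece loop over range(len(pieces)-1): accumulate each piece's net '('-')'
-- count into depth; at the first zero-depth boundary return (consumed, rest).
def pvScanB : List (List Char) → List (List Char) → Int → Option (List (List Char) × List (List Char))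
  | [], _, _ => none
  | [_], _, _ => none
  | p :: rest, consumed, depth =>
    let d := depth + (PySem.Chars.count p ['('] : Int) - (PySem.Chars.count p [')'] : Int)
    if d = 0 then some (consumed ++ [p], rest)
    else pvScanB rest (consumed ++ [p]) d

def parse_operand_text_py_alt (text : String) : Option String × Option String :=
  let parts := PySem.Str.split₀Max (PySem.Str.strip text) 1
  if parts.length < 2 then (none, none)
  else
    let operand_str := PySem.Chars.strip ((PySem.List.pyGet? parts 1).getD "").toList
    let pieces := PySem.Chars.splitOn operand_str [',']
    match pvScanB pieces [] 0 with
    | some (l, r) =>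
      (some (String.ofList (PySem.Chars.strip (PySem.Chars.join [','] l))),
       some (String.ofList (PySem.Chars.strip (PySem.Chars.join [','] r))))
    | none => (some (String.ofList operand_str), none)

-- ===== PRECONDITION & SPEC =====
def Spec_parse_operand_text_py (text : String) (out : Option String × Option String) : Prop := out = parse_operand_text_py_alt text
instance (text : String) (out : Option String × Option String) : Decidable (Spec_parse_operand_text_py text out) := by unfold Spec_parse_operand_text_py; infer_instance

-- ===== CLAIM (what is proved, stated in full; the proofs are below) =====
def Claim_equal_parse_operand_text_py : Prop := ∀ (text : String), Dom_parse_operand_text_py text → Spec_parse_operand_text_py text (parse_operand_text_py text)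

-- ===== LEMMAS AND PROOFS =====

-- simple recursive comma splitter used as the proof-side model of splitOn
def pvSplit : List Char → List (List Char)
  | [] => [[]]
  | c :: cs => if c = ',' then [] :: pvSplit cs else (pvSplit cs).modifyHead (c :: ·)

-- proof-side model of A's scan: relative split position
def pvSp : List Char → Int → Option Nat
  | [], _ => none
  | c :: cs, depth =>
    if c = '(' then (pvSp cs (depth + 1)).map (· + 1)
    else if c = ')' then (pvSp cs (depth - 1)).map (· + 1)
    else if c = ',' ∧ depth = 0 then some 0
    else (pvSp cs depth).map (· + 1)

def pvNet (p : List Char) : Int := (p.count '(' : Int) - (p.count ')' : Int)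

theorem pvCountGo_singleton (c : Char) (fuel : Nat) (l : List Char) (acc : Nat)
    (h : l.length ≤ fuel) :
    PySem.Chars.count.go [c] fuel l acc = acc + l.count c := by
  induction fuel generalizing l acc with
  | zero =>
    have : l = [] := List.length_eq_zero_iff.mp (Nat.le_zero.mp h)
    subst this; simp [PySem.Chars.count.go]
  | succ n ih =>
    cases l with
    | nil => simp [PySem.Chars.count.go]
    | cons a t =>
      simp only [PySem.Chars.count.go, List.isPrefixOf, Bool.and_true]
      by_cases hc : c = a
      · subst hc
        simp only [beq_self_eq_true, if_true, List.length_singleton, List.drop_one, List.tail_cons]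
        rw [ih t (acc + 1) (by simp at h; omega)]
        simp [List.count_cons]
        omega
      · rw [if_neg (by simp [hc])]
        rw [ih t acc (by simp at h; omega)]
        simp [List.count_cons, Ne.symm hc]

theorem pvCount_singleton (cs : List Char) (c : Char) :
    PySem.Chars.count cs [c] = cs.count c := by
  simp [PySem.Chars.count, pvCountGo_singleton c cs.length cs 0 (le_refl _)]

theorem pvModifyHead_comp {α : Type} (f g : List α → List α) (l : List (List α)) :
    (l.modifyHead f).modifyHead g = l.modifyHead (fun x => g (f x)) := by
  cases l <;> simp

theorem pvModifyHead_nil {α : Type} (l : List (List α)) :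
    l.modifyHead (fun x => x) = l := by
  cases l <;> simp

theorem pvSplitOn_go (fuel : Nat) (l cur : List Char) (acc : List (List Char))
    (h : l.length < fuel) :
    PySem.Chars.splitOn.go [','] fuel l cur acc
      = acc.reverse ++ (pvSplit l).modifyHead (cur.reverse ++ ·) := by
  induction fuel generalizing l cur acc with
  | zero => omega
  | succ n ih =>
    cases l with
    | nil => simp [PySem.Chars.splitOn.go, pvSplit]
    | cons c t =>
      simp only [PySem.Chars.splitOn.go, List.isPrefixOf, Bool.and_true]
      by_cases hc : c = ','
      · subst hc
        have h2 := ih t [] (cur.reverse :: acc) (by simp at h ⊢; omega)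
        simp [h2, pvSplit, pvModifyHead_nil]
      · have h2 := ih t (c :: cur) acc (by simp at h ⊢; omega)
        simp only [beq_iff_eq, if_neg (Ne.symm hc), h2, pvSplit, if_neg hc, pvModifyHead_comp]
        simp

theorem pvSplitOn_eq (cs : List Char) : PySem.Chars.splitOn cs [','] = pvSplit cs := by
  have h := pvSplitOn_go (cs.length + 1) cs [] [] (by omega)
  simp only [PySem.Chars.splitOn, h, List.reverse_nil, List.nil_append]
  simpa using pvModifyHead_nil (pvSplit cs)

theorem pvSplit_ne_nil (cs : List Char) : pvSplit cs ≠ [] := by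
  cases cs with
  | nil => simp [pvSplit]
  | cons c cs =>
    simp only [pvSplit]
    split
    · simp
    · cases h : pvSplit cs with
      | nil => exact absurd h (pvSplit_ne_nil cs)
      | cons a l => simp [List.modifyHead]

theorem pvJoin_pvSplit (cs : List Char) : PySem.Chars.join [','] (pvSplit cs) = cs := by
  induction cs with
  | nil => simp [pvSplit, PySem.Chars.join_singleton]
  | cons c t ih =>
    cases h : pvSplit t with
    | nil => exact absurd h (pvSplit_ne_nil t)
    | cons a l =>
      rw [h] at ih
      by_cases hc : c = ','
      · subst hc
        simp only [pvSplit, if_pos rfl, h, if_true]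
        rw [PySem.Chars.join_cons_cons]
        simpa using ih
      · simp only [pvSplit, if_neg hc, h, List.modifyHead]
        cases l with
        | nil => simp only [PySem.Chars.join_singleton] at *; simp [ih]
        | cons b l' => simp only [PySem.Chars.join_cons_cons] at *; simp [ih]

theorem pvScanA_eq (cs : List Char) (d i : Int) :
    pvScanA cs d i = (match pvSp cs d with
      | none => -1
      | some j => i + (j : Int)) := by
  induction cs generalizing d i with
  | nil => simp [pvScanA, pvSp]
  | cons c t ih =>
    simp only [pvScanA, pvSp]
    by_cases h1 : c = '('
    · simp only [if_pos h1, ih]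
      cases pvSp t (d + 1) <;> simp <;> push_cast <;> ring
    · by_cases h2 : c = ')'
      · simp only [if_neg h1, if_pos h2, ih]
        cases pvSp t (d - 1) <;> simp <;> push_cast <;> ring
      · by_cases h3 : c = ',' ∧ d = 0
        · simp [if_neg h1, if_neg h2, if_pos h3]
        · simp only [if_neg h1, if_neg h2, if_neg h3, ih]
          cases pvSp t d <;> simp <;> push_cast <;> ring

theorem pvNet_append_singleton (p : List Char) (c : Char) :
    pvNet (p ++ [c]) = pvNet p + (if c = '(' then 1 else if c = ')' then -1 else 0) := by
  by_cases h1 : c = '('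
  · subst h1; simp [pvNet, List.count_append]; ring
  · by_cases h2 : c = ')'
    · subst h2; simp [pvNet, List.count_append, List.count_singleton, h1]; ring
    · simp [pvNet, List.count_append, List.count_singleton, Ne.symm h1, Ne.symm h2, h1, h2]

theorem pvModifyHead_pre_cons (pre : List Char) (c : Char) (l : List (List Char)) :
    (l.modifyHead (c :: ·)).modifyHead (pre ++ ·) = l.modifyHead (fun x => (pre ++ [c]) ++ x) := by
  cases l <;> simp

theorem pvMain (cs : List Char) (d : Int) (acc : List (List Char)) (pre : List Char) :
    pvScanB ((pvSplit cs).modifyHead (pre ++ ·)) acc (d - pvNet pre) =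
      (pvSp cs d).map (fun j =>
        (acc ++ (pvSplit (cs.take j)).modifyHead (pre ++ ·), pvSplit (cs.drop (j + 1)))) := by
  induction cs generalizing d acc pre with
  | nil => simp [pvSplit, pvSp, pvScanB]
  | cons c t ih =>
    by_cases hc : c = ','
    · subst hc
      cases hs : pvSplit t with
      | nil => exact absurd hs (pvSplit_ne_nil t)
      | cons a l =>
        simp only [pvSplit, if_pos rfl, if_true, hs, List.modifyHead, List.append_nil]
        by_cases hd : d = 0
        · subst hd
          simp only [pvScanB, pvCount_singleton]
          rw [if_pos (by simp only [pvNet]; ring)]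
          simp [pvSp, pvSplit, List.modifyHead, hs]
        · simp only [pvScanB, pvCount_singleton]
          rw [if_neg (by simp only [pvNet]; intro hcon; exact hd (by omega))]
          rw [show d - pvNet pre + (List.count '(' pre : Int) - (List.count ')' pre : Int) = d from by
            simp only [pvNet]; ring]
          have hih := ih d (acc ++ [pre]) []
          simp only [pvNet, List.count_nil, List.nil_append, Nat.cast_zero, sub_zero,
            pvModifyHead_nil, hs] at hih
          rw [hih]
          simp only [pvSp]
          rw [if_neg (show ¬(',' = '(') from by decide), if_neg (show ¬(',' = ')') from by decide)]
          rw [if_neg (show ¬(True ∧ d = 0) from fun h => hd h.2)]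
          cases hsp : pvSp t d with
          | none => simp [hsp]
          | some j =>
            simp only [hsp, Option.map_some]
            congr 1
            simp [pvSplit, List.modifyHead, List.append_assoc, List.take_succ_cons,
              List.drop_succ_cons]
    · have hcomp : (pvSplit (c :: t)).modifyHead (pre ++ ·)
          = (pvSplit t).modifyHead (fun x => (pre ++ [c]) ++ x) := by
        simp only [pvSplit, if_neg hc]
        exact pvModifyHead_pre_cons pre c (pvSplit t)
      rw [hcomp]
      rw [show d - pvNet pre
          = (d + (if c = '(' then (1:Int) else if c = ')' then -1 else 0)) - pvNet (pre ++ [c]) from by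
        rw [pvNet_append_singleton]; ring]
      rw [ih (d + (if c = '(' then (1:Int) else if c = ')' then -1 else 0)) acc (pre ++ [c])]
      by_cases h1 : c = '('
      · rw [show d + (if c = '(' then (1:Int) else if c = ')' then -1 else 0) = d + 1 from by
          simp [h1]]
        simp only [pvSp, if_pos h1]
        cases hsp : pvSp t (d + 1) with
        | none => simp [hsp]
        | some j =>
          simp only [hsp, Option.map_some]
          simp only [List.take_succ_cons, List.drop_succ_cons, pvSplit, if_neg hc,
            pvModifyHead_pre_cons]
      · by_cases h2 : c = ')'
        · rw [show d + (if c = '(' then (1:Int) else if c = ')' then -1 else 0) = d - 1 from by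
            simp [h1, h2]; ring]
          simp only [pvSp, if_neg h1, if_pos h2]
          cases hsp : pvSp t (d - 1) with
          | none => simp [hsp]
          | some j =>
            simp only [hsp, Option.map_some]
            simp only [List.take_succ_cons, List.drop_succ_cons, pvSplit, if_neg hc,
              pvModifyHead_pre_cons]
        · rw [show d + (if c = '(' then (1:Int) else if c = ')' then -1 else 0) = d from by
            simp [h1, h2]]
          simp only [pvSp, if_neg h1, if_neg h2,
            if_neg (show ¬(c = ',' ∧ d = 0) from fun h => hc h.1)]
          cases hsp : pvSp t d with
          | none => simp [hsp]
          | some j =>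
            simp only [hsp, Option.map_some]
            simp only [List.take_succ_cons, List.drop_succ_cons, pvSplit, if_neg hc,
              pvModifyHead_pre_cons]

theorem pvMain0 (cs : List Char) :
    pvScanB (pvSplit cs) [] 0 =
      (pvSp cs 0).map (fun j => (pvSplit (cs.take j), pvSplit (cs.drop (j + 1)))) := by
  have h := pvMain cs 0 [] []
  simp only [List.nil_append, pvNet, List.count_nil, Nat.cast_zero, sub_zero, sub_self,
    pvModifyHead_nil] at h
  simpa using h

-- ===== VERDICT (by name: the statement is the Claim_ definition above) =====
set_option maxHeartbeats 2000000 in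
theorem parse_operand_text_py_spec : Claim_equal_parse_operand_text_py := by
  unfold Claim_equal_parse_operand_text_py
  intro text _
  unfold Spec_parse_operand_text_py parse_operand_text_py parse_operand_text_py_alt
  by_cases hlen : (PySem.Str.split₀Max (PySem.Str.strip text) 1).length < 2
  · simp [hlen]
  · simp only [if_neg hlen]
    rw [pvSplitOn_eq, pvMain0, pvScanA_eq]
    cases hsp : pvSp (PySem.Chars.strip
        ((PySem.List.pyGet? (PySem.Str.split₀Max (PySem.Str.strip text) 1) 1).getD "").toList) 0 with
    | none => simp
    | some j =>
      simp only [Option.map_some]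
      rw [if_pos (by omega : (0:Int) + (j:Int) ≥ 0)]
      rw [PySem.List.slice_to _ (by omega : (0:Int) ≤ 0 + (j:Int))]
      rw [PySem.List.slice_from _ (by omega : (0:Int) ≤ 0 + (j:Int) + 1)]
      rw [show ((0:Int) + (j:Int)).toNat = j from by omega]
      rw [show ((0:Int) + (j:Int) + 1).toNat = j + 1 from by omega]
      simp [pvJoin_pvSplit]
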